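-- pv_equiv track=rewrite | github.com/sarvf/Criptografia | Tareas/Tarea1/tarea1.py | HexMatrizExtendida
-- ===== SOURCE A (Python) =====
-- def HexMatrizExtendida(matriz):
--     matrizExtendida=[["","","","","",""],["","","","","",""],["","","","","",""],["","","","","",""],["","","","","",""],["","","","","",""]]
--     #LLenamos las esquinas de los bordes
--     matrizExtendida[0][0]=matriz[3][3]
--     matrizExtendida[0][5]=matriz[3][0]
--     matrizExtendida[5][0]=matriz[0][3]
--     matrizExtendida[5][5]=matriz[0][0]
--     #Llenamos el resto de bordes
--     for b1 in range(4):
--         matrizExtendida[0][b1+1]=matriz[3][b1]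
--         matrizExtendida[b1+1][0]=matriz[b1][3]
--         matrizExtendida[5][b1+1]=matriz[0][b1]
--         matrizExtendida[b1+1][5]=matriz[b1][0]
--
--     #LLenamos el resto con la matriz del MAL
--     for i in range(4):
--         for j in range(4):
--             matrizExtendida[i+1][j+1]=matriz[i][j]
--
--     return matrizExtendida
-- ===== SOURCE B (Python) =====
-- def HexMatrizExtendida(matriz):
--     return [[matriz[(i - 1) % 4][(j - 1) % 4] for j in range(6)] for i in range(6)]
-- ===== Notes on version B (the rewrite author's own statement) =====
-- stated objective: simpler
-- what changed: A fills the 6x6 result in three special-case passes (four corner assignments, a border-strip loop, an interior double loop); B builds it in one uniform nested comprehension with modular indexing matriz[(i-1)%4][(j-1)%4].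
import Mathlib
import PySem

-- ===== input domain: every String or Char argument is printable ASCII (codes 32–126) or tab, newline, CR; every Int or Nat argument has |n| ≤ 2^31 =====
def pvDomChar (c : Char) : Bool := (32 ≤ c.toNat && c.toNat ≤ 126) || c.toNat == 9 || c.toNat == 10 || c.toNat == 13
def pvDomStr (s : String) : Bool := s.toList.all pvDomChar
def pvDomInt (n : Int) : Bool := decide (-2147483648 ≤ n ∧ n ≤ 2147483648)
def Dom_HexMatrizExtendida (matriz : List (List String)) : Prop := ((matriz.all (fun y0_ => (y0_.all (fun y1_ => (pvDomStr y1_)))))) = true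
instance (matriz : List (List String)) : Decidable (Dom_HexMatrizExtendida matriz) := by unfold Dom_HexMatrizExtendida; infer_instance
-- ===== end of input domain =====

-- B replaces A's three special-case passes (corners, border strips, interior) by one
-- uniform modular-index comprehension; objective: simpler.

-- ===== PORT A =====
-- matriz[i][j] for nonnegative in-range indices (Pre_ guarantees in-range; default never used inside Pre_)
def pvGet2 (matriz : List (List String)) (i j : Int) : String :=
  PySem.List.pyGetD (PySem.List.pyGetD matriz i []) j ""

-- matrizExtendida[i][j] = v  (indices are literal in-range nonnegative values in A)
def pvSet2 (M : List (List String)) (i j : Int) (v : String) : List (List String) :=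
  M.modify i.toNat (fun row => row.set j.toNat v)

def HexMatrizExtendida (matriz : List (List String)) : List (List String) :=
  let m0 : List (List String) :=
    [["","","","","",""],["","","","","",""],["","","","","",""],
     ["","","","","",""],["","","","","",""],["","","","","",""]]
  -- corners
  let m1 := pvSet2 m0 0 0 (pvGet2 matriz 3 3)
  let m2 := pvSet2 m1 0 5 (pvGet2 matriz 3 0)
  let m3 := pvSet2 m2 5 0 (pvGet2 matriz 0 3)
  let m4 := pvSet2 m3 5 5 (pvGet2 matriz 0 0)
  -- border strips: for b1 in range(4)
  let m5 := (PySem.List.pyRange 0 4 1).foldl (fun M b1 =>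
    let M := pvSet2 M 0 (b1+1) (pvGet2 matriz 3 b1)
    let M := pvSet2 M (b1+1) 0 (pvGet2 matriz b1 3)
    let M := pvSet2 M 5 (b1+1) (pvGet2 matriz 0 b1)
    pvSet2 M (b1+1) 5 (pvGet2 matriz b1 0)) m4
  -- interior: for i in range(4): for j in range(4)
  (PySem.List.pyRange 0 4 1).foldl (fun M i =>
    (PySem.List.pyRange 0 4 1).foldl (fun M j =>
      pvSet2 M (i+1) (j+1) (pvGet2 matriz i j)) M) m5

-- ===== PORT B =====
def HexMatrizExtendida_alt (matriz : List (List String)) : List (List String) :=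
  (PySem.List.pyRange 0 6 1).map (fun i =>
    (PySem.List.pyRange 0 6 1).map (fun j =>
      pvGet2 matriz (PySem.Int.mod (i - 1) 4) (PySem.Int.mod (j - 1) 4)))

-- ===== PRECONDITION & SPEC =====
-- Pre_ excludes exactly the inputs where Python A raises IndexError: it reads rows 0..3
-- at columns 0..3, so the first 4 rows must exist and each have at least 4 entries.
def Pre_HexMatrizExtendida (matriz : List (List String)) : Prop :=
  4 ≤ matriz.length ∧ ∀ r ∈ matriz.take 4, 4 ≤ r.length
instance (matriz : List (List String)) : Decidable (Pre_HexMatrizExtendida matriz) := by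
  unfold Pre_HexMatrizExtendida; infer_instance

def pvWitness_HexMatrizExtendida : List (List String) :=
  [["a","b","c","d"],["e","f","g","h"],["i","j","k","l"],["m","n","o","p"]]

def Spec_HexMatrizExtendida (matriz : List (List String)) (out : List (List String)) : Prop := out = HexMatrizExtendida_alt matriz
instance (matriz : List (List String)) (out : List (List String)) : Decidable (Spec_HexMatrizExtendida matriz out) := by unfold Spec_HexMatrizExtendida; infer_instance

-- ===== CLAIM (what is proved, stated in full; the proofs are below) =====
def Claim_equal_HexMatrizExtendida : Prop := ∀ (matriz : List (List String)), Dom_HexMatrizExtendida matriz → Pre_HexMatrizExtendida matriz → Spec_HexMatrizExtendida matriz (HexMatrizExtendida matriz)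

-- ===== LEMMAS AND PROOFS =====

-- Python indexing xs[k] on a list with at least four elements, for the literal indices 0..3.
theorem pvGetD_four_0 {α : Type} (x0 x1 x2 x3 : α) (t : List α) (d : α) :
    PySem.List.pyGetD (x0 :: x1 :: x2 :: x3 :: t) 0 d = x0 := by simp [pysem]
theorem pvGetD_four_1 {α : Type} (x0 x1 x2 x3 : α) (t : List α) (d : α) :
    PySem.List.pyGetD (x0 :: x1 :: x2 :: x3 :: t) 1 d = x1 := by simp [pysem]
theorem pvGetD_four_2 {α : Type} (x0 x1 x2 x3 : α) (t : List α) (d : α) :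
    PySem.List.pyGetD (x0 :: x1 :: x2 :: x3 :: t) 2 d = x2 := by simp [pysem]
theorem pvGetD_four_3 {α : Type} (x0 x1 x2 x3 : α) (t : List α) (d : α) :
    PySem.List.pyGetD (x0 :: x1 :: x2 :: x3 :: t) 3 d = x3 := by simp [pysem]

-- ===== VERDICT (by name: the statement is the Claim_ definition above) =====
theorem HexMatrizExtendida_spec : Claim_equal_HexMatrizExtendida := by
  intro matriz hdom hpre
  obtain ⟨hlen, hrow⟩ := hpre
  obtain ⟨r0, r1, r2, r3, rest, rfl⟩ :
      ∃ r0 r1 r2 r3 rest, matriz = r0 :: r1 :: r2 :: r3 :: rest := by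
    match matriz, hlen with
    | a :: b :: c :: d :: t, _ => exact ⟨a, b, c, d, t, rfl⟩
  have h0 : 4 ≤ r0.length := hrow r0 (by simp)
  have h1 : 4 ≤ r1.length := hrow r1 (by simp)
  have h2 : 4 ≤ r2.length := hrow r2 (by simp)
  have h3 : 4 ≤ r3.length := hrow r3 (by simp)
  clear hdom hlen hrow
  obtain ⟨a0,a1,a2,a3,t0,rfl⟩ : ∃ x0 x1 x2 x3 t, r0 = x0::x1::x2::x3::t := by
    match r0, h0 with | a::b::c::d::t, _ => exact ⟨a,b,c,d,t,rfl⟩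
  obtain ⟨b0,b1,b2,b3,t1,rfl⟩ : ∃ x0 x1 x2 x3 t, r1 = x0::x1::x2::x3::t := by
    match r1, h1 with | a::b::c::d::t, _ => exact ⟨a,b,c,d,t,rfl⟩
  obtain ⟨c0,c1,c2,c3,t2,rfl⟩ : ∃ x0 x1 x2 x3 t, r2 = x0::x1::x2::x3::t := by
    match r2, h2 with | a::b::c::d::t, _ => exact ⟨a,b,c,d,t,rfl⟩
  obtain ⟨d0,d1,d2,d3,t3,rfl⟩ : ∃ x0 x1 x2 x3 t, r3 = x0::x1::x2::x3::t := by
    match r3, h3 with | a::b::c::d::t, _ => exact ⟨a,b,c,d,t,rfl⟩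
  clear h0 h1 h2 h3
  have e4 : PySem.List.pyRange 0 4 1 = [0,1,2,3] := by decide
  have e6 : PySem.List.pyRange 0 6 1 = [0,1,2,3,4,5] := by decide
  have m0 : PySem.Int.mod (0 - 1) 4 = 3 := by decide
  have m1 : PySem.Int.mod (1 - 1) 4 = 0 := by decide
  have m2 : PySem.Int.mod (2 - 1) 4 = 1 := by decide
  have m3 : PySem.Int.mod (3 - 1) 4 = 2 := by decide
  have m4 : PySem.Int.mod (4 - 1) 4 = 3 := by decide
  have m5 : PySem.Int.mod (5 - 1) 4 = 0 := by decide
  show HexMatrizExtendida _ = HexMatrizExtendida_alt _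
  rw [HexMatrizExtendida, HexMatrizExtendida_alt, e4, e6]
  simp only [List.foldl, List.map, m0, m1, m2, m3, m4, m5, pvGet2,
    pvGetD_four_0, pvGetD_four_1, pvGetD_four_2, pvGetD_four_3]
  rfl
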